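-- pv_equiv track=rewrite | github.com/randometerian/TUNA | tuna/art.py | _kmeans_palette
-- ===== SOURCE A (Python) =====
-- def _kmeans_palette(pixels: list, k: int) -> list:
--     if len(pixels) < k:
--         return pixels[:k]
--     step    = len(pixels) // k
--     centres = [pixels[i * step] for i in range(k)]
--     buckets = [[] for _ in range(k)]
--     for px in pixels:
--         best = min(range(k), key=lambda i: _dist2(px, centres[i]))
--         buckets[best].append(px)
--     result = []
--     for i, bucket in enumerate(buckets):
--         if not bucket:
--             result.append(centres[i])
--         else:
--             result.append((
--                 sum(p[0] for p in bucket) // len(bucket),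
--                 sum(p[1] for p in bucket) // len(bucket),
--                 sum(p[2] for p in bucket) // len(bucket),
--             ))
--     return result
--
-- def _dist2(a, b):
--     return (a[0]-b[0])**2 + (a[1]-b[1])**2 + (a[2]-b[2])**2
-- ===== SOURCE B (Python) =====
-- def _kmeans_palette(pixels: list, k: int) -> list:
--     if len(pixels) < k:
--         return pixels[:k]
--     step    = len(pixels) // k
--     centres = [pixels[i * step] for i in range(k)]
--     sums    = [(0, 0, 0)] * k
--     counts  = [0] * k
--     for px in pixels:
--         best = min(range(k), key=lambda i: _dist2(px, centres[i]))
--         s = sums[best]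
--         sums[best]   = (s[0] + px[0], s[1] + px[1], s[2] + px[2])
--         counts[best] = counts[best] + 1
--     return [centres[i] if counts[i] == 0
--             else (sums[i][0] // counts[i], sums[i][1] // counts[i], sums[i][2] // counts[i])
--             for i in range(k)]
--
-- def _dist2(a, b):
--     return (a[0]-b[0])**2 + (a[1]-b[1])**2 + (a[2]-b[2])**2
-- ===== Notes on version B (the rewrite author's own statement) =====
-- stated objective: alternative
-- what changed: B keeps per-centre running sums and counts updated inside the single pixel loop instead of materialising per-centre bucket lists and making a second full pass over all assigned pixels to sum them.
import Mathlib
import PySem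

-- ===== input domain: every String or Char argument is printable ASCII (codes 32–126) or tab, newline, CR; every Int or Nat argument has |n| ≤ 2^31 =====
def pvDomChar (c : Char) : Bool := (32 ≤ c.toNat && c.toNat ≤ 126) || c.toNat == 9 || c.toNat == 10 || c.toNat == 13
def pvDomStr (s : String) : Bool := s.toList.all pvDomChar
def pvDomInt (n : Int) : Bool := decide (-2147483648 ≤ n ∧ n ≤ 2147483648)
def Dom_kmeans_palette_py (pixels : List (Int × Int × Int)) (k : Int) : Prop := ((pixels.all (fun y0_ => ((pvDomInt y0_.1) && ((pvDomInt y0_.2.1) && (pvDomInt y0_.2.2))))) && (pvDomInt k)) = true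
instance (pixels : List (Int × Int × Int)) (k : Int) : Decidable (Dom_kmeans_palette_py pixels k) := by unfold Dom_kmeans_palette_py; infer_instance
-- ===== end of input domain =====

-- B maintains per-centre running sums and counts inside the single pixel loop instead of
-- materialising bucket lists and summing them in a second pass; return value proved equal on Pre_.

-- ===== PORT A =====
-- _dist2(a, b)
def pvDist2 (a b : Int × Int × Int) : Int :=
  (a.1 - b.1) ^ 2 + (a.2.1 - b.2.1) ^ 2 + (a.2.2 - b.2.2) ^ 2

-- min(range(k), key=lambda i: _dist2(px, centres[i])): first index with minimal key
-- (Python min keeps the earlier element on ties: replace only on strict '<'); used by both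
-- Pythons verbatim. centres[i] is always in range under Pre_, so getD's default is never read.
def pvBest (centres : List (Int × Int × Int)) (kn : Nat) (px : Int × Int × Int) : Nat :=
  (List.range kn).foldl
    (fun best i =>
      if pvDist2 px (centres.getD i (0, 0, 0)) < pvDist2 px (centres.getD best (0, 0, 0)) then i
      else best) 0

-- pixels[i * step]: in range whenever k ≤ len(pixels) and 0 < k, so getD's default is never read.
def pvCentres (pixels : List (Int × Int × Int)) (kn : Nat) (step : Int) : List (Int × Int × Int) :=
  (List.range kn).map (fun i => pixels.getD (i * step.toNat) (0, 0, 0))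

def kmeans_palette_py (pixels : List (Int × Int × Int)) (k : Int) : List (Int × Int × Int) :=
  if (pixels.length : Int) < k then PySem.List.slice pixels none (some k)
  else
    let kn := k.toNat
    let step := PySem.Int.floordiv (pixels.length : Int) k
    let centres := pvCentres pixels kn step
    let buckets := pixels.foldl
      (fun bs px =>
        let best := pvBest centres kn px
        bs.set best (bs.getD best [] ++ [px]))
      (List.replicate kn ([] : List (Int × Int × Int)))
    (List.range kn).foldl
      (fun result i =>
        let bucket := buckets.getD i []
        if bucket.isEmpty then result ++ [centres.getD i (0, 0, 0)]
        else
          result ++ [(PySem.Int.floordiv (bucket.map (·.1)).sum (bucket.length : Int),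
                      PySem.Int.floordiv (bucket.map (·.2.1)).sum (bucket.length : Int),
                      PySem.Int.floordiv (bucket.map (·.2.2)).sum (bucket.length : Int))]) []

-- ===== PORT B =====
def kmeans_palette_py_alt (pixels : List (Int × Int × Int)) (k : Int) : List (Int × Int × Int) :=
  if (pixels.length : Int) < k then PySem.List.slice pixels none (some k)
  else
    let kn := k.toNat
    let step := PySem.Int.floordiv (pixels.length : Int) k
    let centres := pvCentres pixels kn step
    let sc := pixels.foldl
      (fun (sc : List (Int × Int × Int) × List Int) px =>
        let best := pvBest centres kn px
        let s := sc.1.getD best (0, 0, 0)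
        (sc.1.set best (s.1 + px.1, s.2.1 + px.2.1, s.2.2 + px.2.2),
         sc.2.set best (sc.2.getD best 0 + 1)))
      (List.replicate kn ((0 : Int), (0 : Int), (0 : Int)), List.replicate kn (0 : Int))
    (List.range kn).map
      (fun i =>
        if sc.2.getD i 0 = 0 then centres.getD i (0, 0, 0)
        else
          (PySem.Int.floordiv (sc.1.getD i (0, 0, 0)).1 (sc.2.getD i 0),
           PySem.Int.floordiv (sc.1.getD i (0, 0, 0)).2.1 (sc.2.getD i 0),
           PySem.Int.floordiv (sc.1.getD i (0, 0, 0)).2.2 (sc.2.getD i 0)))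

-- ===== PRECONDITION & SPEC =====
-- Pre_ excludes exactly the inputs where the Python A raises: k = 0 (ZeroDivisionError in
-- len(pixels) // k) and k < 0 with nonempty pixels (ValueError: min() of an empty range).
def Pre_kmeans_palette_py (pixels : List (Int × Int × Int)) (k : Int) : Prop :=
  0 < k ∨ (pixels = [] ∧ k < 0)
instance (pixels : List (Int × Int × Int)) (k : Int) : Decidable (Pre_kmeans_palette_py pixels k) := by unfold Pre_kmeans_palette_py; infer_instance

def pvWitness_kmeans_palette_py : (List (Int × Int × Int)) × Int := ([(1, 2, 3), (4, 5, 6), (10, 10, 10)], 2)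

def Spec_kmeans_palette_py (pixels : List (Int × Int × Int)) (k : Int) (out : List (Int × Int × Int)) : Prop := out = kmeans_palette_py_alt pixels k
instance (pixels : List (Int × Int × Int)) (k : Int) (out : List (Int × Int × Int)) : Decidable (Spec_kmeans_palette_py pixels k out) := by unfold Spec_kmeans_palette_py; infer_instance

-- ===== CLAIM (what is proved, stated in full; the proofs are below) =====
def Claim_equal_kmeans_palette_py : Prop := ∀ (pixels : List (Int × Int × Int)) (k : Int), Dom_kmeans_palette_py pixels k → Pre_kmeans_palette_py pixels k → Spec_kmeans_palette_py pixels k (kmeans_palette_py pixels k)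

-- ===== LEMMAS AND PROOFS =====

-- the sums / lengths of A's buckets: exactly B's loop state
def pvSumsOf (bs : List (List (Int × Int × Int))) : List (Int × Int × Int) :=
  bs.map (fun b => ((b.map (·.1)).sum, (b.map (·.2.1)).sum, (b.map (·.2.2)).sum))

def pvCountsOf (bs : List (List (Int × Int × Int))) : List Int :=
  bs.map (fun b => (b.length : Int))

theorem pv_getD_map {α β : Type} (f : α → β) (d : α) :
    ∀ (bs : List α) (i : Nat), (bs.map f).getD i (f d) = f (bs.getD i d) := by
  intro bs
  induction bs with
  | nil => intro i; simp
  | cons b bs ih =>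
    intro i
    cases i with
    | zero => simp
    | succ n => simp only [List.map_cons, List.getD_cons_succ]; exact ih n

theorem pvSumsOf_step (px : Int × Int × Int) :
    ∀ (bs : List (List (Int × Int × Int))) (best : Nat),
      pvSumsOf (bs.set best (bs.getD best [] ++ [px])) =
        (pvSumsOf bs).set best
          (((pvSumsOf bs).getD best (0, 0, 0)).1 + px.1,
           ((pvSumsOf bs).getD best (0, 0, 0)).2.1 + px.2.1,
           ((pvSumsOf bs).getD best (0, 0, 0)).2.2 + px.2.2) := by
  intro bs
  induction bs with
  | nil => intro best; simp [pvSumsOf]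
  | cons b bs ih =>
    intro best
    cases best with
    | zero => simp [pvSumsOf]
    | succ n =>
      have := ih n
      simp [pvSumsOf, List.set] at this ⊢
      exact this

theorem pvCountsOf_step (px : Int × Int × Int) :
    ∀ (bs : List (List (Int × Int × Int))) (best : Nat),
      pvCountsOf (bs.set best (bs.getD best [] ++ [px])) =
        (pvCountsOf bs).set best ((pvCountsOf bs).getD best 0 + 1) := by
  intro bs
  induction bs with
  | nil => intro best; simp [pvCountsOf]
  | cons b bs ih =>
    intro best
    cases best with
    | zero => simp [pvCountsOf]
    | succ n =>
      have := ih n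
      simp [pvCountsOf, List.set] at this ⊢
      exact this

-- B's fold over (sums, counts) tracks the sums / lengths of A's fold over buckets
theorem pv_fold_inv (centres : List (Int × Int × Int)) (kn : Nat) :
    ∀ (ps : List (Int × Int × Int)) (bs : List (List (Int × Int × Int))),
      ps.foldl
        (fun (sc : List (Int × Int × Int) × List Int) px =>
          let best := pvBest centres kn px
          let s := sc.1.getD best (0, 0, 0)
          (sc.1.set best (s.1 + px.1, s.2.1 + px.2.1, s.2.2 + px.2.2),
           sc.2.set best (sc.2.getD best 0 + 1)))
        (pvSumsOf bs, pvCountsOf bs) =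
      (pvSumsOf (ps.foldl
          (fun bs px =>
            let best := pvBest centres kn px
            bs.set best (bs.getD best [] ++ [px])) bs),
       pvCountsOf (ps.foldl
          (fun bs px =>
            let best := pvBest centres kn px
            bs.set best (bs.getD best [] ++ [px])) bs)) := by
  intro ps
  induction ps with
  | nil => intro bs; simp
  | cons px ps ih =>
    intro bs
    simp only [List.foldl_cons]
    have h := ih (bs.set (pvBest centres kn px) (bs.getD (pvBest centres kn px) [] ++ [px]))
    rw [pvSumsOf_step, pvCountsOf_step] at h
    exact h

-- ===== VERDICT (by name: the statement is the Claim_ definition above) =====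
theorem kmeans_palette_py_spec : Claim_equal_kmeans_palette_py := by
  intro pixels k _ _
  unfold Spec_kmeans_palette_py kmeans_palette_py kmeans_palette_py_alt
  by_cases hlt : (pixels.length : Int) < k
  · rw [if_pos hlt, if_pos hlt]
  · rw [if_neg hlt, if_neg hlt]
    dsimp only
    set kn := k.toNat with hkn
    set step := PySem.Int.floordiv (pixels.length : Int) k with hstep
    set centres := pvCentres pixels kn step with hc
    have hinit : (List.replicate kn ((0 : Int), (0 : Int), (0 : Int)), List.replicate kn (0 : Int)) =
        (pvSumsOf (List.replicate kn ([] : List (Int × Int × Int))),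
         pvCountsOf (List.replicate kn ([] : List (Int × Int × Int)))) := by
      simp [pvSumsOf, pvCountsOf]
    set buckets := pixels.foldl
      (fun bs px =>
        let best := pvBest centres kn px
        bs.set best (bs.getD best [] ++ [px]))
      (List.replicate kn ([] : List (Int × Int × Int))) with hb
    have hsc : pixels.foldl
        (fun (sc : List (Int × Int × Int) × List Int) px =>
          let best := pvBest centres kn px
          let s := sc.1.getD best (0, 0, 0)
          (sc.1.set best (s.1 + px.1, s.2.1 + px.2.1, s.2.2 + px.2.2),
           sc.2.set best (sc.2.getD best 0 + 1)))
        (List.replicate kn ((0 : Int), (0 : Int), (0 : Int)), List.replicate kn (0 : Int)) =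
        (pvSumsOf buckets, pvCountsOf buckets) := by
      rw [hinit, pv_fold_inv centres kn pixels, hb]
    rw [hsc]
    -- A's append loop is the map of its body over range kn
    have hA : (List.range kn).foldl
        (fun result i =>
          let bucket := buckets.getD i []
          if bucket.isEmpty then result ++ [centres.getD i (0, 0, 0)]
          else
            result ++ [(PySem.Int.floordiv (bucket.map (·.1)).sum (bucket.length : Int),
                        PySem.Int.floordiv (bucket.map (·.2.1)).sum (bucket.length : Int),
                        PySem.Int.floordiv (bucket.map (·.2.2)).sum (bucket.length : Int))]) [] =
        (List.range kn).map
          (fun i =>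
            let bucket := buckets.getD i []
            if bucket.isEmpty then centres.getD i (0, 0, 0)
            else (PySem.Int.floordiv (bucket.map (·.1)).sum (bucket.length : Int),
                  PySem.Int.floordiv (bucket.map (·.2.1)).sum (bucket.length : Int),
                  PySem.Int.floordiv (bucket.map (·.2.2)).sum (bucket.length : Int))) := by
      have hfun : (fun (result : List (Int × Int × Int)) (i : Nat) =>
          let bucket := buckets.getD i []
          if bucket.isEmpty then result ++ [centres.getD i (0, 0, 0)]
          else
            result ++ [(PySem.Int.floordiv (bucket.map (·.1)).sum (bucket.length : Int),
                        PySem.Int.floordiv (bucket.map (·.2.1)).sum (bucket.length : Int),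
                        PySem.Int.floordiv (bucket.map (·.2.2)).sum (bucket.length : Int))]) =
          (fun result i => result ++
            [(fun j : Nat =>
               let bucket := buckets.getD j []
               if bucket.isEmpty then centres.getD j (0, 0, 0)
               else (PySem.Int.floordiv (bucket.map (·.1)).sum (bucket.length : Int),
                     PySem.Int.floordiv (bucket.map (·.2.1)).sum (bucket.length : Int),
                     PySem.Int.floordiv (bucket.map (·.2.2)).sum (bucket.length : Int))) i]) := by
        funext result i
        dsimp only
        split <;> rfl
      rw [hfun, PySem.List.foldl_append_singleton_eq_map, List.nil_append]
    rw [hA]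
    apply List.map_congr_left
    intro i _
    have hs : (pvSumsOf buckets).getD i (0, 0, 0) =
        (((buckets.getD i []).map (·.1)).sum, ((buckets.getD i []).map (·.2.1)).sum,
         ((buckets.getD i []).map (·.2.2)).sum) :=
  by simpa [pvSumsOf] using pv_getD_map (fun b : List (Int × Int × Int) =>
        ((b.map (·.1)).sum, (b.map (·.2.1)).sum, (b.map (·.2.2)).sum)) [] buckets i
    have hct : (pvCountsOf buckets).getD i 0 =
        ((buckets.getD i []).length : Int) :=
      by simpa [pvCountsOf] using pv_getD_map (fun b : List (Int × Int × Int) => (b.length : Int)) [] buckets i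
    dsimp only
    rw [hct, hs]
    by_cases hb0 : buckets.getD i [] = []
    · rw [if_pos (List.isEmpty_iff.mpr hb0), if_pos (by rw [hb0]; rfl)]
    · have hlen : ((buckets.getD i []).length : Int) ≠ 0 := by
        simpa [List.length_eq_zero_iff] using hb0
      rw [if_neg (fun h => hb0 (List.isEmpty_iff.mp h)), if_neg hlen]
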